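-- pv_equiv track=rewrite | github.com/Curtin-Timescales-of-Mineral-Systems/LeadLoss | src/process/cdc/surfaces.py | _findOptimalIndex
-- ===== SOURCE A (Python) =====
-- def _findOptimalIndex(valuesToCompare):
--     """
--     Select the best index with the published plateau-aware tie handling.
--     """
--     vals = list(valuesToCompare)
--     if len(vals) == 0:
--         return 0
--
--     minIndex, minValue = min(enumerate(vals), key=lambda v: v[1])
--     n = len(vals)
--
--     startMinIndex = minIndex
--     while startMinIndex > 0 and vals[startMinIndex - 1] == minValue:
--         startMinIndex -= 1
--
--     endMinIndex = minIndex
--     while endMinIndex < n - 1 and vals[endMinIndex + 1] == minValue: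
--         endMinIndex += 1
--
--     if (endMinIndex != n - 1 and startMinIndex != 0) or (endMinIndex == n - 1 and startMinIndex == 0):
--         return (endMinIndex + startMinIndex) // 2
--     if startMinIndex == 0:
--         return 0
--     return n - 1
-- ===== SOURCE B (Python) =====
-- def _findOptimalIndex(valuesToCompare):
--     """
--     Select the best index with the published plateau-aware tie handling.
--     Single forward scan maintaining the current minimum, the index of its
--     first occurrence (start) and the right end of the contiguous run of
--     that minimum beginning at start.
--     """
--     minValue = None
--     start = end = 0
--     n = 0
--     for i, v in enumerate(valuesToCompare):
--         n = i + 1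
--         if minValue is None or v < minValue:
--             minValue = v
--             start = end = i
--         elif v == minValue and i == end + 1:
--             end = i
--     if minValue is None:
--         return 0
--     if (end != n - 1 and start != 0) or (end == n - 1 and start == 0):
--         return (end + start) // 2
--     if start == 0:
--         return 0
--     return n - 1
-- ===== Notes on version B (the rewrite author's own statement) =====
-- stated objective: simpler
-- what changed: Replaces A's min(enumerate(...)) pass plus two plateau-expanding while-loops (and the list copy) by one forward scan maintaining the current minimum, the index of its first occurrence and the right end of its contiguous run.
import Mathlib
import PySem

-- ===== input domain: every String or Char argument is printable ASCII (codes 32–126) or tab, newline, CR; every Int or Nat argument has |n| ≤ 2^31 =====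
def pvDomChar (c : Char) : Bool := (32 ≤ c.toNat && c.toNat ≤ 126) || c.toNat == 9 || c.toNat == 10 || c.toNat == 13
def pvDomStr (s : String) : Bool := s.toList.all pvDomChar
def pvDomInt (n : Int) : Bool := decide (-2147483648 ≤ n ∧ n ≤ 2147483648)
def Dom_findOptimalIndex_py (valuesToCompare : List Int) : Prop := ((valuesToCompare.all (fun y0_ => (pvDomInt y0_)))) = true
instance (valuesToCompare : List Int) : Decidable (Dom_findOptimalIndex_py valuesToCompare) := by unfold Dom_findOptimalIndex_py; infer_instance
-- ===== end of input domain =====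

-- B replaces A's min(enumerate(...)) plus two plateau-expanding while-loops by one
-- forward scan maintaining (current min, first index of it, right end of its contiguous run).

-- ===== PORT A =====
-- while startMinIndex > 0 and vals[startMinIndex - 1] == minValue: startMinIndex -= 1
-- (the index s - 1 is in range whenever the access happens, so pyGetD with default 0 is exact)
def pvLeftLoopA (vals : List Int) (m : Int) (s : Int) : Int :=
  if h : 0 < s ∧ PySem.List.pyGetD vals (s - 1) 0 = m then pvLeftLoopA vals m (s - 1) else s
termination_by s.toNat
decreasing_by omega

-- while endMinIndex < n - 1 and vals[endMinIndex + 1] == minValue: endMinIndex += 1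
-- (the index e + 1 is in range whenever the access happens, so pyGetD with default 0 is exact)
def pvRightLoopA (vals : List Int) (m n e : Int) : Int :=
  if h : e < n - 1 ∧ PySem.List.pyGetD vals (e + 1) 0 = m then pvRightLoopA vals m n (e + 1) else e
termination_by (n - 1 - e).toNat
decreasing_by omega

def findOptimalIndex_py (valuesToCompare : List Int) : Int :=
  let vals := valuesToCompare
  if vals.length = 0 then 0
  else
    match PySem.List.min? (PySem.List.enumerate vals 0) (fun v => v.2) with
    | none => 0  -- unreachable totality guard: vals is nonempty here
    | some (minIndex, minValue) =>
      let n : Int := vals.length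
      let startMinIndex := pvLeftLoopA vals minValue minIndex
      let endMinIndex := pvRightLoopA vals minValue n minIndex
      if (endMinIndex ≠ n - 1 ∧ startMinIndex ≠ 0) ∨ (endMinIndex = n - 1 ∧ startMinIndex = 0) then
        PySem.Int.floordiv (endMinIndex + startMinIndex) 2
      else if startMinIndex = 0 then 0
      else n - 1

-- ===== PORT B =====
-- state = (minValue : Option Int, start, end, n); one step of the forward scan
def pvScanStep (st : Option Int × Int × Int × Int) (p : Int × Int) : Option Int × Int × Int × Int :=
  match st, p with
  | (mv, start, end_, _), (i, v) =>
    match mv with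
    | none => (some v, i, i, i + 1)
    | some m =>
      if v < m then (some v, i, i, i + 1)
      else if v = m ∧ i = end_ + 1 then (some m, start, i, i + 1)
      else (some m, start, end_, i + 1)

def findOptimalIndex_py_alt (valuesToCompare : List Int) : Int :=
  match (PySem.List.enumerate valuesToCompare 0).foldl pvScanStep (none, 0, 0, 0) with
  | (none, _, _, _) => 0
  | (some _, start, end_, n) =>
    if (end_ ≠ n - 1 ∧ start ≠ 0) ∨ (end_ = n - 1 ∧ start = 0) then
      PySem.Int.floordiv (end_ + start) 2
    else if start = 0 then 0
    else n - 1

-- ===== PRECONDITION & SPEC =====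
def Spec_findOptimalIndex_py (valuesToCompare : List Int) (out : Int) : Prop := out = findOptimalIndex_py_alt valuesToCompare
instance (valuesToCompare : List Int) (out : Int) : Decidable (Spec_findOptimalIndex_py valuesToCompare out) := by unfold Spec_findOptimalIndex_py; infer_instance

-- ===== CLAIM (what is proved, stated in full; the proofs are below) =====
def Claim_equal_findOptimalIndex_py : Prop := ∀ (valuesToCompare : List Int), Dom_findOptimalIndex_py valuesToCompare → Spec_findOptimalIndex_py valuesToCompare (findOptimalIndex_py valuesToCompare)

-- ===== LEMMAS AND PROOFS =====

-- joint invariant of B's scan and A's min(enumerate(...)) on a nonempty list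
def pvInv (l : List Int) (m s e : Int) : Prop :=
  (PySem.List.enumerate l 0).foldl pvScanStep (none, 0, 0, 0) = (some m, s, e, (l.length : Int)) ∧
  PySem.List.min? (PySem.List.enumerate l 0) (fun v => v.2) = some (s, m) ∧
  0 ≤ s ∧ s ≤ e ∧ e < (l.length : Int) ∧
  (∀ k : Nat, s ≤ (k : Int) → (k : Int) ≤ e → l.getD k 0 = m) ∧
  (∀ k : Nat, (k : Int) < s → m < l.getD k 0) ∧
  (∀ x ∈ l, m ≤ x) ∧
  (e = (l.length : Int) - 1 ∨ l.getD (e.toNat + 1) 0 ≠ m)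

theorem min?_append_singleton {α κ : Type} [LT κ] [DecidableLT κ] (xs : List α) (x : α) (key : α → κ) :
    PySem.List.min? (xs ++ [x]) key =
      match PySem.List.min? xs key with
      | none => some x
      | some m => if key x < key m then some x else some m := by
  simp only [PySem.List.min?, List.foldl_append, List.foldl_cons, List.foldl_nil]
  rfl

theorem pvInv_exists (l : List Int) (hl : l ≠ []) : ∃ m s e, pvInv l m s e := by
  induction l using List.reverseRecOn with
  | nil => exact absurd rfl hl
  | append_singleton xs v ih =>
    by_cases hxs : xs = []
    · subst hxs
      refine ⟨v, 0, 0, ?_, ?_, le_rfl, le_rfl, by simp, ?_, ?_, ?_, ?_⟩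
      · simp [PySem.List.enumerate_cons, PySem.List.enumerate_nil, pvScanStep]
      · simp [PySem.List.min?, PySem.List.enumerate_cons, PySem.List.enumerate_nil]
      · intro k hk1 hk2
        have : k = 0 := by omega
        subst this; rfl
      · intro k hk; omega
      · intro x hx; simp at hx; subst hx; exact le_rfl
      · left; simp
    · obtain ⟨m, s, e, hfold, hmin, hs0, hse, helen, hplat, hbefore, hminle, hstop⟩ := ih hxs
      have hLenum : PySem.List.enumerate (xs ++ [v]) 0 =
          PySem.List.enumerate xs 0 ++ [((xs.length : Int), v)] := by
        rw [PySem.List.enumerate_append]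
        simp [PySem.List.enumerate_cons, PySem.List.enumerate_nil]
      have hfold' : (PySem.List.enumerate (xs ++ [v]) 0).foldl pvScanStep (none, 0, 0, 0) =
          pvScanStep (some m, s, e, (xs.length : Int)) ((xs.length : Int), v) := by
        rw [hLenum, List.foldl_append, hfold]; rfl
      have hmin' : PySem.List.min? (PySem.List.enumerate (xs ++ [v]) 0) (fun p => p.2) =
          (if v < m then some ((xs.length : Int), v) else some (s, m)) := by
        rw [hLenum, min?_append_singleton, hmin]
      have hlenA : ((xs ++ [v]).length : Int) = (xs.length : Int) + 1 := by
        simp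
      have hmem : ∀ k : Nat, k < xs.length → (xs ++ [v]).getD k 0 = xs.getD k 0 :=
        fun k hk => List.getD_append xs [v] 0 k hk
      have hlast : (xs ++ [v]).getD xs.length 0 = v := by
        rw [List.getD_append_right xs [v] 0 xs.length le_rfl]; simp
      have hmemxs : ∀ k : Nat, k < xs.length → xs.getD k 0 ∈ xs := by
        intro k hk
        rw [List.getD_eq_getElem xs 0 hk]
        exact List.getElem_mem hk
      by_cases h1 : v < m
      · -- strictly smaller value: reset start = end = i
        refine ⟨v, (xs.length : Int), (xs.length : Int), ?_, ?_, by omega, le_rfl, by omega,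
          ?_, ?_, ?_, ?_⟩
        · rw [hfold', hlenA]; simp [pvScanStep, h1]
        · rw [hmin', if_pos h1]
        · intro k hk1 hk2
          have : k = xs.length := by omega
          subst this; exact hlast
        · intro k hk
          have hk' : k < xs.length := by omega
          rw [hmem k hk']
          exact lt_of_lt_of_le h1 (hminle _ (hmemxs k hk'))
        · intro x hx
          rcases List.mem_append.1 hx with h | h
          · exact le_of_lt (lt_of_lt_of_le h1 (hminle x h))
          · simp at h; subst h; exact le_rfl
        · left; omega
      · by_cases h2 : v = m ∧ (xs.length : Int) = e + 1
        · -- equal and contiguous: extend the run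
          refine ⟨m, s, (xs.length : Int), ?_, ?_, hs0, by omega, by omega, ?_, ?_, ?_, ?_⟩
          · rw [hfold', hlenA]; simp [pvScanStep, h2.1, h2.2]
          · rw [hmin', if_neg h1]
          · intro k hk1 hk2
            by_cases hk : k < xs.length
            · rw [hmem k hk]
              exact hplat k hk1 (by omega)
            · have : k = xs.length := by omega
              subst this; rw [hlast]; exact h2.1
          · intro k hk
            have hk' : k < xs.length := by omega
            rw [hmem k hk']
            exact hbefore k hk
          · intro x hx
            rcases List.mem_append.1 hx with h | h
            · exact hminle x h
            · simp at h; subst h; exact le_of_eq h2.1.symm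
          · left; omega
        · -- larger, or equal but not contiguous: state unchanged
          refine ⟨m, s, e, ?_, ?_, hs0, hse, by omega, ?_, ?_, ?_, ?_⟩
          · rw [hfold', hlenA]; simp [pvScanStep, h1, h2]
          · rw [hmin', if_neg h1]
          · intro k hk1 hk2
            have hk : k < xs.length := by omega
            rw [hmem k hk]
            exact hplat k hk1 hk2
          · intro k hk
            have hk' : k < xs.length := by omega
            rw [hmem k hk']
            exact hbefore k hk
          · intro x hx
            rcases List.mem_append.1 hx with h | h
            · exact hminle x h
            · simp at h; subst h; exact le_of_not_gt h1
          · right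
            by_cases he : e = (xs.length : Int) - 1
            · have : e.toNat + 1 = xs.length := by omega
              rw [this, hlast]
              intro hvm
              exact h2 ⟨hvm, by omega⟩
            · rcases hstop with h | h
              · exact absurd h he
              · have hk : e.toNat + 1 < xs.length := by omega
                rw [hmem _ hk]
                exact h

theorem pvLeftLoopA_eq (l : List Int) (m s : Int)
    (hlt : ∀ k : Nat, (k : Int) < s → m < l.getD k 0) :
    pvLeftLoopA l m s = s := by
  rw [pvLeftLoopA, dif_neg]
  rintro ⟨hpos, heq⟩
  rw [PySem.List.pyGetD_of_nonneg l 0 (by omega)] at heq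
  have h := hlt (s - 1).toNat (by omega)
  omega

theorem pvRightLoopA_stop (l : List Int) (m e : Int) (he0 : 0 ≤ e)
    (hstop : e = (l.length : Int) - 1 ∨ l.getD (e.toNat + 1) 0 ≠ m) :
    pvRightLoopA l m (l.length : Int) e = e := by
  rw [pvRightLoopA, dif_neg]
  rintro ⟨h1, h2⟩
  rcases hstop with h | h
  · omega
  · rw [PySem.List.pyGetD_of_nonneg l 0 (by omega)] at h2
    have : (e + 1).toNat = e.toNat + 1 := by omega
    rw [this] at h2
    exact h h2

theorem pvRightLoopA_eq (l : List Int) (m e : Int) (hen : e < (l.length : Int))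
    (hstop : e = (l.length : Int) - 1 ∨ l.getD (e.toNat + 1) 0 ≠ m) :
    ∀ c : Int, 0 ≤ c → c ≤ e → (∀ k : Nat, c ≤ (k : Int) → (k : Int) ≤ e → l.getD k 0 = m) →
    pvRightLoopA l m (l.length : Int) c = e := by
  have H : ∀ fuel : Nat, ∀ c : Int, (e - c).toNat ≤ fuel → 0 ≤ c → c ≤ e →
      (∀ k : Nat, c ≤ (k : Int) → (k : Int) ≤ e → l.getD k 0 = m) →
      pvRightLoopA l m (l.length : Int) c = e := by
    intro fuel
    induction fuel with
    | zero =>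
      intro c hf hc0 hce _
      have hce' : c = e := by omega
      subst hce'
      exact pvRightLoopA_stop l m c hc0 hstop
    | succ f ih =>
      intro c hf hc0 hce hplat
      by_cases hc : c = e
      · subst hc
        exact pvRightLoopA_stop l m c hc0 hstop
      · have hclt : c < e := lt_of_le_of_ne hce hc
        rw [pvRightLoopA, dif_pos]
        · exact ih (c + 1) (by omega) (by omega) (by omega)
            (fun k hk1 hk2 => hplat k (by omega) hk2)
        · refine ⟨by omega, ?_⟩
          rw [PySem.List.pyGetD_of_nonneg l 0 (by omega)]
          exact hplat (c + 1).toNat (by omega) (by omega)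
  exact fun c => H (e - c).toNat c le_rfl

-- ===== VERDICT (by name: the statement is the Claim_ definition above) =====
theorem findOptimalIndex_py_spec : Claim_equal_findOptimalIndex_py := by
  intro l _
  unfold Spec_findOptimalIndex_py
  by_cases hl : l = []
  · subst hl; rfl
  · obtain ⟨m, s, e, hfold, hmin, hs0, hse, helen, hplat, hbefore, _hmin_le, hstop⟩ :=
      pvInv_exists l hl
    have hleft : pvLeftLoopA l m s = s :=
      pvLeftLoopA_eq l m s hbefore
    have hright : pvRightLoopA l m (l.length : Int) s = e :=
      pvRightLoopA_eq l m e helen hstop s hs0 hse hplat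
    unfold findOptimalIndex_py findOptimalIndex_py_alt
    simp only [hfold, hmin, List.length_eq_zero_iff, hl, if_false, hleft, hright]
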